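-- pv_equiv track=rewrite | github.com/ozanyetkin/mi545 | hw3/question2.py | foo
-- ===== SOURCE A (Python) =====
-- def foo(n):
--     if n < 5:
--         total = n
--     else:
--         total = 0
--         for i in [1,2,3]:
--             total += foo(n//4 + i)
--     while n > 0:
--         total += n
--         n = n // 2
--     return total
-- ===== SOURCE B (Python) =====
-- def foo(n):
--     memo = {}
--
--     def go(n):
--         if n in memo:
--             return memo[n]
--         if n < 5:
--             total = n
--         else:
--             q = n // 4
--             total = go(q + 1) + go(q + 2) + go(q + 3)
--         if n > 0:
--             # sum of n, n//2, n//4, ... in closed form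
--             total += 2 * n - bin(n).count("1")
--         memo[n] = total
--         return total
--
--     return go(n)
-- ===== Notes on version B (the rewrite author's own statement) =====
-- stated objective: faster
-- what changed: B memoizes the branching recursion on its integer argument with a dict and replaces the halving while-loop by the closed form 2*n - popcount(n), so each distinct argument is computed once in O(1) extra work.
import Mathlib
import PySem

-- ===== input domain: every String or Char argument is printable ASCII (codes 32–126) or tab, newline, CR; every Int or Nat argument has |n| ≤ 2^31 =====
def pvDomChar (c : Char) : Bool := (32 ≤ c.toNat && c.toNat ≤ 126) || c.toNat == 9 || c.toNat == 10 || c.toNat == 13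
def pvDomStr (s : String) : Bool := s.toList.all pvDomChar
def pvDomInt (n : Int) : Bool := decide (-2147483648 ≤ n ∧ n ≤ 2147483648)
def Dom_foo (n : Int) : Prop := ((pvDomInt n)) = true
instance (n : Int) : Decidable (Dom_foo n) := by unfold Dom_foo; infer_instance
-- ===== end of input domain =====

-- B memoizes foo on its integer argument with a dict and replaces the halving while-loop by the
-- closed form 2*n - popcount(n): one computation per distinct argument (asymptotically faster).

-- ===== PORT A =====
-- termination measures for the two Python loops (cited by name in decreasing_by)
lemma pvHalfLt (m : Int) (h : m > 0) : (PySem.Int.floordiv m 2).toNat < m.toNat := by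
  rw [PySem.Int.floordiv_eq_ediv_of_pos (by omega : (0:Int) < 2)]; omega

lemma pvQuarterLt (n i : Int) (h : ¬ n < 5) (h1 : 1 ≤ i) (h3 : i ≤ 3) :
    (PySem.Int.floordiv n 4 + i).toNat < n.toNat := by
  rw [PySem.Int.floordiv_eq_ediv_of_pos (by omega : (0:Int) < 4)]; omega

-- the 'while n > 0: total += n; n = n // 2' loop of A
def fooWhile (m total : Int) : Int :=
  if m > 0 then fooWhile (PySem.Int.floordiv m 2) (total + m) else total
termination_by m.toNat
decreasing_by
  exact pvHalfLt m (by assumption)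

def foo (n : Int) : Int :=
  -- the 'for i in [1,2,3]' loop is unrolled: total = 0 + foo(n//4+1) + foo(n//4+2) + foo(n//4+3)
  let total :=
    if n < 5 then n
    else 0 + foo (PySem.Int.floordiv n 4 + 1) + foo (PySem.Int.floordiv n 4 + 2)
           + foo (PySem.Int.floordiv n 4 + 3)
  fooWhile n total
termination_by n.toNat
decreasing_by
  all_goals exact pvQuarterLt n _ (by assumption) (by omega) (by omega)

-- ===== PORT B =====
-- B's memoized recursion 'go', threading the memo dict; the popcount of bin(n) is
-- ported with PySem.Int.bitCount
def fooGo (n : Int) (memo : PySem.Dict Int Int) : Int × PySem.Dict Int Int :=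
  match memo.get? n with
  | some v => (v, memo)
  | none =>
    if n < 5 then
      let total := if n > 0 then n + (2 * n - (PySem.Int.bitCount n : Int)) else n
      (total, memo.insert n total)
    else
      let q := PySem.Int.floordiv n 4
      let r1 := fooGo (q + 1) memo
      let r2 := fooGo (q + 2) r1.2
      let r3 := fooGo (q + 3) r2.2
      let t0 := r1.1 + r2.1 + r3.1
      let total := if n > 0 then t0 + (2 * n - (PySem.Int.bitCount n : Int)) else t0
      (total, r3.2.insert n total)
termination_by n.toNat
decreasing_by
  all_goals exact pvQuarterLt n _ (by assumption) (by omega) (by omega)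

def foo_alt (n : Int) : Int := (fooGo n PySem.Dict.empty).1

-- ===== PRECONDITION & SPEC =====
def Spec_foo (n : Int) (out : Int) : Prop := out = foo_alt n
instance (n : Int) (out : Int) : Decidable (Spec_foo n out) := by unfold Spec_foo; infer_instance

-- ===== CLAIM (what is proved, stated in full; the proofs are below) =====
def Claim_equal_foo : Prop := ∀ (n : Int), Dom_foo n → Spec_foo n (foo n)

-- ===== LEMMAS AND PROOFS =====

-- A's while loop in closed form: it adds n + n//2 + n//4 + ... = 2n - popcount(n) for n > 0
lemma fooWhile_closed (m t : Int) :
    fooWhile m t = if m > 0 then t + (2 * m - (PySem.Int.bitCount m : Int)) else t := by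
  fun_induction fooWhile m t with
  | case1 m t h ih =>
    rw [ih]
    have hfd : PySem.Int.floordiv m 2 = m / 2 :=
      PySem.Int.floordiv_eq_ediv_of_pos (by omega)
    have hbc : PySem.Int.bitCount m
        = (PySem.Int.mod m 2).toNat + PySem.Int.bitCount (PySem.Int.floordiv m 2) :=
      PySem.Int.bitCount_of_pos h
    have hmod : PySem.Int.mod m 2 = m % 2 := PySem.Int.mod_eq_emod_of_pos (by omega)
    rw [hfd] at ih ⊢
    split_ifs with h2
    · rw [hbc, hfd, hmod]
      generalize PySem.Int.bitCount (m / 2) = b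
      push_cast
      omega
    · have hm1 : m = 1 := by omega
      subst hm1
      have hb1 : ((PySem.Int.bitCount 1 : Nat) : Int) = 1 := by decide
      rw [hb1]; ring
  | case2 m t h => rw [if_neg h]

-- the memo invariant: every cached value is foo of its key
def MemoOK (memo : PySem.Dict Int Int) : Prop :=
  ∀ k v, memo.get? k = some v → v = foo k

lemma fooGo_spec : ∀ (N : Nat) (n : Int), n.toNat < N → ∀ memo : PySem.Dict Int Int,
    MemoOK memo → (fooGo n memo).1 = foo n ∧ MemoOK (fooGo n memo).2 := by
  intro N
  induction N with
  | zero => intro n hn; omega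
  | succ N ih =>
    intro n hn memo hmemo
    rw [fooGo]
    split
    next v hv => exact ⟨hmemo n v hv, hmemo⟩
    next hnone =>
      by_cases hlt : n < 5
      · rw [if_pos hlt]
        show (if n > 0 then n + (2 * n - (PySem.Int.bitCount n : Int)) else n) = foo n ∧
          MemoOK (memo.insert n (if n > 0 then n + (2 * n - (PySem.Int.bitCount n : Int)) else n))
        have htot : (if n > 0 then n + (2 * n - (PySem.Int.bitCount n : Int)) else n) = foo n := by
          rw [foo]
          simp only [if_pos hlt]
          rw [fooWhile_closed]
        refine ⟨htot, ?_⟩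
        intro k v hk
        rcases eq_or_ne k n with rfl | hne
        · rw [PySem.Dict.get?_insert_self, Option.some.injEq] at hk
          rw [← hk, htot]
        · rw [PySem.Dict.get?_insert_of_ne _ _ hne] at hk
          exact hmemo k v hk
      · rw [if_neg hlt]
        have hq : PySem.Int.floordiv n 4 = n / 4 :=
          PySem.Int.floordiv_eq_ediv_of_pos (by omega)
        have hlt1 : (PySem.Int.floordiv n 4 + 1).toNat < N := by rw [hq]; omega
        have hlt2 : (PySem.Int.floordiv n 4 + 2).toNat < N := by rw [hq]; omega
        have hlt3 : (PySem.Int.floordiv n 4 + 3).toNat < N := by rw [hq]; omega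
        obtain ⟨e1, m1ok⟩ := ih _ hlt1 memo hmemo
        obtain ⟨e2, m2ok⟩ := ih _ hlt2 _ m1ok
        obtain ⟨e3, m3ok⟩ := ih _ hlt3 _ m2ok
        set f1 := fooGo (PySem.Int.floordiv n 4 + 1) memo with hf1
        set f2 := fooGo (PySem.Int.floordiv n 4 + 2) f1.2 with hf2
        set f3 := fooGo (PySem.Int.floordiv n 4 + 3) f2.2 with hf3
        show (if n > 0 then f1.1 + f2.1 + f3.1 + (2 * n - (PySem.Int.bitCount n : Int))
                else f1.1 + f2.1 + f3.1) = foo n ∧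
          MemoOK (f3.2.insert n (if n > 0 then f1.1 + f2.1 + f3.1 + (2 * n - (PySem.Int.bitCount n : Int))
                else f1.1 + f2.1 + f3.1))
        have htot : (if n > 0 then f1.1 + f2.1 + f3.1 + (2 * n - (PySem.Int.bitCount n : Int))
                else f1.1 + f2.1 + f3.1) = foo n := by
          conv_rhs => rw [foo]
          simp only [if_neg hlt]
          rw [fooWhile_closed, e1, e2, e3]
          split_ifs with h0
          · ring
          · ring
        refine ⟨htot, ?_⟩
        intro k v hk
        rcases eq_or_ne k n with rfl | hne
        · rw [PySem.Dict.get?_insert_self, Option.some.injEq] at hk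
          rw [← hk, htot]
        · rw [PySem.Dict.get?_insert_of_ne _ _ hne] at hk
          exact m3ok k v hk

-- ===== VERDICT (by name: the statement is the Claim_ definition above) =====
theorem foo_spec : Claim_equal_foo := by
  intro n _
  unfold Spec_foo foo_alt
  have h : MemoOK PySem.Dict.empty := by
    intro k v hk
    rw [PySem.Dict.get?_empty] at hk
    exact absurd hk (by simp)
  exact ((fooGo_spec (n.toNat + 1) n (by omega) PySem.Dict.empty h).1).symm
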